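-- pv_equiv track=rewrite | github.com/giovanni-cutri/soccer-players-in-common | soccer-players-in-common.py | get_players_in_common
-- ===== SOURCE A (Python) =====
-- def get_players_in_common(players):
--     unsorted_players_in_common =  players[0]
--     for counter, _ in enumerate(players):
--         try:
--             unsorted_players_in_common = [player for player in unsorted_players_in_common if player in players[counter + 1]]
--         except IndexError:
--             break
--
--     players_in_common = sorted(unsorted_players_in_common, key = lambda x: x["name"])
--
--     return players_in_common
-- ===== SOURCE B (Python) =====
-- def _insert_by_name(p, result):
--     # splice p in before the first entry whose name sorts strictly after p's
--     for i, q in enumerate(result):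
--         if p["name"] < q["name"]:
--             return result[:i] + [p] + result[i:]
--     return result + [p]
--
--
-- def get_players_in_common(players):
--     rest = players[1:]
--     result = []
--     for p in players[0]:
--         if all(p in lst for lst in rest):
--             result = _insert_by_name(p, result)
--     return result
-- ===== Notes on version B (the rewrite author's own statement) =====
-- stated objective: alternative
-- what changed: Instead of A's staged passes (an enumerate loop rebinding an accumulator through repeated filters, stopped by try/except IndexError, followed by a final sorted() call), B makes one pass over players[0], keeping a player iff it is in every remaining list and splicing each kept player directly into its sorted-by-name position, so no sort call remains.
import Mathlib
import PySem

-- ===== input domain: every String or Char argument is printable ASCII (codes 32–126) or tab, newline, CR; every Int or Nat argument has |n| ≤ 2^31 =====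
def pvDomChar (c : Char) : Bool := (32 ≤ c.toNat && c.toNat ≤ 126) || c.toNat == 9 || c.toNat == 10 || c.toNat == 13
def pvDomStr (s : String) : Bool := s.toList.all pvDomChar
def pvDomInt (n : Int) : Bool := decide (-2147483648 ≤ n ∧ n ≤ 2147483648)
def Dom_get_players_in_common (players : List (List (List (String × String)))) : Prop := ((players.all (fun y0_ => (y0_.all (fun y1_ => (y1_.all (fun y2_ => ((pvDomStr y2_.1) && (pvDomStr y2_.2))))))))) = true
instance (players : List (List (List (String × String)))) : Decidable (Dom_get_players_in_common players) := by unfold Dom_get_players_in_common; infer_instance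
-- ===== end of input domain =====

-- B drops A's staged re-filtering and final sort: it makes ONE pass over players[0], keeping a
-- player iff it is in every remaining list and splicing it directly into its sorted-by-name slot.


-- ===== PORT A =====
-- Python `==` on two dicts, as A's `player in players[counter + 1]` uses it: same size and every
-- (k, v) of d1 found by (first-match) lookup in d2. Exact for dicts whose keys are distinct,
-- which Pre_ guarantees.
def pvDictEq (d1 d2 : List (String × String)) : Bool :=
  d1.length == d2.length && d1.all (fun kv => d2.lookup kv.1 == some kv.2)

-- sort key x["name"]: first-match lookup; exact under Pre_ ("name" present, keys distinct).
def pvNameKey (d : List (String × String)) : String := (d.lookup "name").getD ""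

-- players.headD [] is players[0] (Pre_ excludes the empty list, where Python raises IndexError);
-- the enumerate loop filters by membership in players[counter+1], and the break on IndexError is
-- the identity arm at the final (out-of-range) index.
def get_players_in_common (players : List (List (List (String × String)))) : List (List (String × String)) :=
  PySem.List.sorted
    ((List.range players.length).foldl
      (fun acc counter =>
        -- players[counter + 1]: none = IndexError = the break (identity arm)
        (players[counter + 1]?).elim acc
          (fun nxt => acc.filter (fun player => nxt.any (fun q => pvDictEq player q))))
      (players.headD []))
    pvNameKey

-- ===== PORT B =====
-- Python `==` on two dicts, as B's `p in lst` uses it: every pair of each dict is found by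
-- lookup in the other (equal key sets with equal values). Exact for dicts whose keys are
-- distinct, which Pre_ guarantees.
def pvSameDict (d e : List (String × String)) : Bool :=
  d.all (fun kv => e.lookup kv.1 == some kv.2) && e.all (fun kv => d.lookup kv.1 == some kv.2)

-- _insert_by_name: splice p in before the first entry whose "name" sorts strictly after p's
-- (the enumerate loop returning result[:i] + [p] + result[i:], else result + [p]).
def pvInsertByName (p : List (String × String)) :
    List (List (String × String)) → List (List (String × String))
  | [] => [p]
  | q :: qs =>
      if (p.lookup "name").getD "" < (q.lookup "name").getD ""
      then p :: q :: qs
      else q :: pvInsertByName p qs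

-- one pass over players[0] (headD [] — Pre_ excludes the empty list): keep p iff it is in every
-- list of rest = players[1:], splicing each kept p into its sorted slot.
def get_players_in_common_alt (players : List (List (List (String × String)))) : List (List (String × String)) :=
  let rest := players.drop 1
  (players.headD []).foldl
    (fun result p =>
      if rest.all (fun lst => lst.any (fun q => pvSameDict p q))
      then pvInsertByName p result
      else result) []

-- ===== PRECONDITION & SPEC =====
-- Pre_ excludes: the empty list (A raises IndexError on players[0]); dicts with duplicate keys
-- (a Lean association list with a repeated key has no faithful Python-dict counterpart); and
-- inputs where some dict of players[0] that survives the filtering (i.e. equals, as a set of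
-- pairs, some dict of every later list) lacks a "name" key — exactly where A raises KeyError.
def Pre_get_players_in_common (players : List (List (List (String × String)))) : Prop :=
  players ≠ [] ∧
  (∀ lst ∈ players, ∀ d ∈ lst, (d.map Prod.fst).Nodup) ∧
  (∀ d ∈ players.headD [],
     (∀ lst ∈ players.drop 1, ∃ q ∈ lst, (∀ kv ∈ d, kv ∈ q) ∧ (∀ kv ∈ q, kv ∈ d)) →
     "name" ∈ d.map Prod.fst)
instance (players : List (List (List (String × String)))) : Decidable (Pre_get_players_in_common players) := by unfold Pre_get_players_in_common; infer_instance

def pvWitness_get_players_in_common : (List (List (List (String × String)))) :=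
  [[[("name", "bob")], [("name", "amy")]], [[("name", "amy")], [("name", "bob")]]]

def Spec_get_players_in_common (players : List (List (List (String × String)))) (out : List (List (String × String))) : Prop := out = get_players_in_common_alt players
instance (players : List (List (List (String × String)))) (out : List (List (String × String))) : Decidable (Spec_get_players_in_common players out) := by unfold Spec_get_players_in_common; infer_instance

-- ===== CLAIM (what is proved, stated in full; the proofs are below) =====
def Claim_equal_get_players_in_common : Prop := ∀ (players : List (List (List (String × String)))), Dom_get_players_in_common players → Pre_get_players_in_common players → Spec_get_players_in_common players (get_players_in_common players)

-- ===== LEMMAS AND PROOFS =====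

-- assoc-list facts used to relate the two renderings of Python dict `==`
theorem lookup_some_mem {κ ν : Type} [BEq κ] [LawfulBEq κ] (l : List (κ × ν)) (k : κ) (v : ν)
    (h : l.lookup k = some v) : (k, v) ∈ l := by
  induction l with
  | nil => simp at h
  | cons a t ih =>
    obtain ⟨a1, a2⟩ := a
    rw [List.lookup_cons] at h
    by_cases hk : k == a1
    · simp [hk] at h
      simp at hk
      subst hk
      subst h
      simp
    · simp [hk] at h ⊢
      right
      exact ih h

theorem lookup_some_of_mem_fst {κ ν : Type} [BEq κ] [LawfulBEq κ] (l : List (κ × ν)) (k : κ)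
    (h : k ∈ l.map Prod.fst) : ∃ v, l.lookup k = some v := by
  induction l with
  | nil => simp at h
  | cons a t ih =>
    rw [List.lookup_cons]
    by_cases hk : k == a.1
    · exact ⟨a.2, by simp [hk]⟩
    · simp [hk] at h ⊢
      rcases h with h | h
      · simp_all
      · exact ih (by simpa using h)

theorem lookup_eq_of_mem_nodup {κ ν : Type} [BEq κ] [LawfulBEq κ] (l : List (κ × ν)) (kv : κ × ν)
    (h : (l.map Prod.fst).Nodup) (hm : kv ∈ l) : l.lookup kv.1 = some kv.2 := by
  induction l with
  | nil => simp at hm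
  | cons a t ih =>
    obtain ⟨a1, a2⟩ := a
    rw [List.lookup_cons]
    rw [List.map_cons, List.nodup_cons] at h
    rw [List.mem_cons] at hm
    rcases hm with rfl | hm
    · simp
    · have hne : ¬ (kv.1 == a1) = true := by
        simp
        intro he
        exact h.1 (he ▸ List.mem_map.2 ⟨kv, hm, rfl⟩)
      simp only [hne]
      exact ih h.2 hm

-- the two renderings of Python dict `==` agree on dicts with distinct keys
theorem pvSameDict_eq_pvDictEq (d e : List (String × String))
    (hd : (d.map Prod.fst).Nodup) (he : (e.map Prod.fst).Nodup) :
    pvSameDict d e = pvDictEq d e := by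
  unfold pvSameDict pvDictEq
  rw [Bool.eq_iff_iff]
  simp only [Bool.and_eq_true, List.all_eq_true, beq_iff_eq]
  constructor
  · rintro ⟨h1, h2⟩
    refine ⟨?_, h1⟩
    -- mutual lookup-subsets give mutually included key lists, hence equal lengths
    have hsub : d.map Prod.fst ⊆ e.map Prod.fst := by
      intro k hk
      rcases List.mem_map.1 hk with ⟨kv, hkv, rfl⟩
      exact List.mem_map.2 ⟨(kv.1, kv.2), lookup_some_mem e kv.1 kv.2 (h1 kv hkv), rfl⟩
    have hsub' : e.map Prod.fst ⊆ d.map Prod.fst := by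
      intro k hk
      rcases List.mem_map.1 hk with ⟨kv, hkv, rfl⟩
      exact List.mem_map.2 ⟨(kv.1, kv.2), lookup_some_mem d kv.1 kv.2 (h2 kv hkv), rfl⟩
    have a1 := (List.subperm_of_subset hd hsub).length_le
    have a2 := (List.subperm_of_subset he hsub').length_le
    simp only [List.length_map] at a1 a2
    omega
  · rintro ⟨hlen, h1⟩
    refine ⟨h1, ?_⟩
    -- equal lengths force the key lists to be a permutation, so e looks up into d too
    have hsub : d.map Prod.fst ⊆ e.map Prod.fst := by
      intro k hk
      rcases List.mem_map.1 hk with ⟨kv, hkv, rfl⟩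
      exact List.mem_map.2 ⟨(kv.1, kv.2), lookup_some_mem e kv.1 kv.2 (h1 kv hkv), rfl⟩
    have hperm : (d.map Prod.fst).Perm (e.map Prod.fst) :=
      (List.subperm_of_subset hd hsub).perm_of_length_le (by simp [hlen])
    intro kv hkv
    have hk : kv.1 ∈ d.map Prod.fst :=
      hperm.mem_iff.2 (List.mem_map.2 ⟨kv, hkv, rfl⟩)
    rcases lookup_some_of_mem_fst d kv.1 hk with ⟨v, hv⟩
    have hekv : e.lookup kv.1 = some kv.2 := lookup_eq_of_mem_nodup e kv he hkv
    have hevv : e.lookup kv.1 = some v := h1 _ (lookup_some_mem d kv.1 v hv)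
    rw [hv]
    rw [hekv] at hevv
    have hvv : kv.2 = v := by simpa using hevv
    rw [hvv]

-- pvInsertByName is PySem's stable insertion step for the "name" key
theorem pvInsertByName_eq_insertBy (p : List (String × String)) :
    ∀ l, pvInsertByName p l
      = PySem.List.insertBy (fun a b => decide (pvNameKey a < pvNameKey b)) p l := by
  intro l
  induction l with
  | nil => rfl
  | cons q qs ih =>
    show (if (p.lookup "name").getD "" < (q.lookup "name").getD "" then p :: q :: qs
          else q :: pvInsertByName p qs)
       = (if decide (pvNameKey p < pvNameKey q) = true then p :: q :: qs
          else q :: PySem.List.insertBy (fun a b => decide (pvNameKey a < pvNameKey b)) p qs)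
    by_cases h : pvNameKey p < pvNameKey q
    · rw [if_pos (show (p.lookup "name").getD "" < (q.lookup "name").getD "" from h),
          if_pos (by simpa using h)]
    · rw [if_neg (show ¬ (p.lookup "name").getD "" < (q.lookup "name").getD "" from h),
          if_neg (by simpa using h), ih]

-- folding f over the in-range elements of t, fetched by index, is folding f over t
theorem foldl_range_getElem {α β : Type} (f : β → α → β) :
    ∀ (t : List α) (s : β),
      (List.range t.length).foldl
        (fun acc c => (t[c]?).elim acc (f acc)) s
      = t.foldl f s := by
  intro t
  induction t with
  | nil => intro s; simp
  | cons x t ih =>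
    intro s
    rw [List.length_cons, List.range_succ_eq_map, List.foldl_cons, List.foldl_map]
    simpa using ih (f s x)

-- A's loop shape: indices shifted by one, with the out-of-range final index a no-op (the break)
theorem foldl_range_succIdx {α β : Type} (f : β → α → β) :
    ∀ (l : List α) (s : β),
      (List.range l.length).foldl
        (fun acc c => (l[c + 1]?).elim acc (f acc)) s
      = (l.drop 1).foldl f s := by
  intro l s
  cases l with
  | nil => simp
  | cons a t =>
    simp only [List.length_cons, List.getElem?_cons_succ, List.drop_succ_cons, List.drop_zero]
    rw [List.range_succ, List.foldl_append]
    simp only [List.foldl_cons, List.foldl_nil]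
    rw [List.getElem?_eq_none (le_refl t.length)]
    exact foldl_range_getElem f t s

-- sequential filters are one filter by the conjunction over the list of outer lists
theorem foldl_filter_eq_filter_all {α β : Type} (pred : β → α → Bool) :
    ∀ (ls : List β) (xs : List α),
      ls.foldl (fun acc l => acc.filter (fun x => pred l x)) xs
      = xs.filter (fun x => ls.all (fun l => pred l x)) := by
  intro ls
  induction ls with
  | nil => intro xs; simp
  | cons l ls ih =>
    intro xs
    rw [List.foldl_cons, ih, List.filter_filter]
    simp [Bool.and_comm]

-- ===== VERDICT (by name: the statement is the Claim_ definition above) =====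
theorem get_players_in_common_spec : Claim_equal_get_players_in_common := by
  intro players _ hpre
  obtain ⟨-, hnodup, -⟩ := hpre
  unfold Spec_get_players_in_common get_players_in_common get_players_in_common_alt
  -- A's side: the staged filters are one filter, then the sort
  rw [foldl_range_succIdx
        (fun acc nxt => acc.filter (fun player => nxt.any (fun q => pvDictEq player q)))
        players (players.headD []),
      foldl_filter_eq_filter_all
        (fun nxt p => nxt.any (fun q => pvDictEq p q)) (players.drop 1) (players.headD [])]
  -- B's side: the guard-then-insert fold is the insert fold of the filtered list
  show PySem.List.sorted _ pvNameKey
      = (players.headD []).foldl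
          (fun result p =>
            if (players.drop 1).all (fun lst => lst.any (fun q => pvSameDict p q))
            then pvInsertByName p result else result) []
  rw [← List.foldl_filter]
  -- the two membership predicates agree on dicts with distinct keys
  have hfc : (players.headD []).filter
        (fun p => (players.drop 1).all (fun lst => lst.any (fun q => pvSameDict p q)))
      = (players.headD []).filter
        (fun p => (players.drop 1).all (fun lst => lst.any (fun q => pvDictEq p q))) := by
    apply List.filter_congr
    intro p hp
    have hpnod : (p.map Prod.fst).Nodup := by
      cases players with
      | nil => simp at hp
      | cons h t => exact hnodup h (by simp) p hp
    have hsame : ∀ lst ∈ players.drop 1, ∀ q ∈ lst, pvSameDict p q = pvDictEq p q := by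
      intro lst hl q hq
      exact pvSameDict_eq_pvDictEq p q hpnod
        (hnodup lst (List.mem_of_mem_drop hl) q hq)
    rw [Bool.eq_iff_iff]
    simp only [List.all_eq_true, List.any_eq_true]
    constructor
    · intro h lst hl
      obtain ⟨q, hq, hs⟩ := h lst hl
      exact ⟨q, hq, (hsame lst hl q hq) ▸ hs⟩
    · intro h lst hl
      obtain ⟨q, hq, hs⟩ := h lst hl
      exact ⟨q, hq, (hsame lst hl q hq).symm ▸ hs⟩
  rw [hfc]
  -- B's insert is PySem's stable insertion step, so the fold is exactly the sort
  rw [show (fun (result : List (List (String × String))) p => pvInsertByName p result)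
        = fun result p =>
            PySem.List.insertBy (fun a b => decide (pvNameKey a < pvNameKey b)) p result from
      funext fun r => funext fun p => pvInsertByName_eq_insertBy p r]
  rfl
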